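-- pv_equiv track=rewrite | github.com/csmyth215/AdventOfCode2020 | Day_Fourteen.py | mask_variants
-- ===== SOURCE A (Python) =====
-- def mask_variants(this_mask):
--     if not 'X' in this_mask:
--         return [this_mask]
--
--     results = []
--     i = this_mask.index('X')
--     zero_mask = this_mask[:i] + "0" + this_mask[i+1:]
--     one_mask = this_mask[:i] + "1" + this_mask[i+1:]
--     results.extend(mask_variants(zero_mask))
--     results.extend(mask_variants(one_mask))
--
--     return results
-- ===== SOURCE B (Python) =====
-- def mask_variants(this_mask):
--     idxs = [i for i, c in enumerate(this_mask) if c == 'X']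
--     combos = [[]]
--     for _ in idxs:
--         combos = [bits + [b] for bits in combos for b in '01']
--     results = []
--     for bits in combos:
--         chars = list(this_mask)
--         for i, b in zip(idxs, bits):
--             chars[i] = b
--         results.append(''.join(chars))
--     return results
-- ===== Notes on version B (the rewrite author's own statement) =====
-- stated objective: alternative
-- what changed: Replaces the string-splicing recursion on the first 'X' by a flat enumeration: collect all 'X' indices once, build the bit combinations iteratively (MSB-first), and patch a char-list copy of the mask per combination.
import Mathlib
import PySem

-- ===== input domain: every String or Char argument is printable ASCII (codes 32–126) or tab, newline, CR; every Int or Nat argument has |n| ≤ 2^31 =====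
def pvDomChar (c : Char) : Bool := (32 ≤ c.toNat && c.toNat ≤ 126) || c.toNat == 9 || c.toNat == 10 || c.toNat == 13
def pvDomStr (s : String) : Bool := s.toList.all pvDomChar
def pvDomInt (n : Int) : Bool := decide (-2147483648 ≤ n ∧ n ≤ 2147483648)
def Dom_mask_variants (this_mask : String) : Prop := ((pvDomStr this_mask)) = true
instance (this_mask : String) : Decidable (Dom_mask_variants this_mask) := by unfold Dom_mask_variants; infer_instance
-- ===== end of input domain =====

-- B replaces A's string-splicing recursion on the first 'X' by a flat enumeration (collect the 'X'
-- indices once, build all bit combinations iteratively, patch a copy of the mask per combination).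

-- ===== PORT A =====
-- Both ports work on the mask's character list (strings are ported as List Char, per PYSEM).
-- The next three lemmas are needed by maskVarA's termination proof, so they stay above the port.
theorem pvIndexLt (l : List Char) (i : Nat) (h : PySem.List.index? l 'X' = some i) :
    i < l.length := by
  rcases (PySem.List.index?_eq_some_iff l 'X' i).1 h with ⟨pre, suf, rfl, rfl, -⟩
  simp

theorem pvSliceSet (l : List Char) (i : Nat) (c : Char) (h : i < l.length) :
    PySem.List.slice l none (some (i : Int)) ++ [c] ++ PySem.List.slice l (some ((i : Int) + 1)) none
      = l.set i c := by
  have h1 : PySem.List.slice l none (some (i : Int)) = l.take i := PySem.List.slice_to_natCast l i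
  have h2 : PySem.List.slice l (some ((i : Int) + 1)) none = l.drop (i + 1) := by
    have e : ((i : Int) + 1) = ((i + 1 : Nat) : Int) := by push_cast; ring
    rw [e, PySem.List.slice_from_natCast]
  rw [h1, h2, List.set_eq_take_cons_drop c h]
  simp

theorem pvCountSetLt (l : List Char) (i : Nat) (c : Char) (hc : c ≠ 'X')
    (h : PySem.List.index? l 'X' = some i) : (l.set i c).count 'X' < l.count 'X' := by
  rcases (PySem.List.index?_eq_some_iff l 'X' i).1 h with ⟨pre, suf, rfl, rfl, -⟩
  have hset : (pre ++ 'X' :: suf).set pre.length c = pre ++ c :: suf := by simp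
  rw [hset]
  simp [List.count_append, hc]

def maskVarA (l : List Char) : List (List Char) :=
  if PySem.Chars.isIn ['X'] l = false then [l]
  else
    match hidx : PySem.List.index? l 'X' with
    | some i =>
        -- zero_mask / one_mask = this_mask[:i] + "0"/"1" + this_mask[i+1:]
        maskVarA (PySem.List.slice l none (some (i : Int)) ++ ['0'] ++ PySem.List.slice l (some ((i : Int) + 1)) none)
          ++ maskVarA (PySem.List.slice l none (some (i : Int)) ++ ['1'] ++ PySem.List.slice l (some ((i : Int) + 1)) none)
    | none => [l]   -- unreachable: the guard ensures 'X' occurs, so .index returns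
termination_by l.count 'X'
decreasing_by
  · rw [pvSliceSet l i '0' (pvIndexLt l i hidx)]
    exact pvCountSetLt l i '0' (by decide) hidx
  · rw [pvSliceSet l i '1' (pvIndexLt l i hidx)]
    exact pvCountSetLt l i '1' (by decide) hidx

def mask_variants (this_mask : String) : List String :=
  (maskVarA this_mask.toList).map String.ofList

-- ===== PORT B =====
-- idxs = [i for i, c in enumerate(this_mask) if c == 'X']
def pvXIndices (l : List Char) : List Int :=
  ((PySem.List.enumerate l 0).filter (fun p => p.2 == 'X')).map (fun p => p.1)

-- combos = [[]]; for _ in idxs: combos = [bits + [b] for bits in combos for b in '01']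
def pvCombos (idxs : List Int) : List (List Char) :=
  idxs.foldl (fun cs _ => cs.flatMap (fun bits => ['0', '1'].map (fun b => bits ++ [b]))) [[]]

def maskVarB (l : List Char) : List (List Char) :=
  -- per combo: chars = list(mask); for i, b in zip(idxs, bits): chars[i] = b  (i ≥ 0: .toNat is exact)
  (pvCombos (pvXIndices l)).map
    (fun bits => ((pvXIndices l).zip bits).foldl (fun ch p => ch.set p.1.toNat p.2) l)

def mask_variants_alt (this_mask : String) : List String :=
  (maskVarB this_mask.toList).map String.ofList

-- ===== PRECONDITION & SPEC =====
def Spec_mask_variants (this_mask : String) (out : List String) : Prop := out = mask_variants_alt this_mask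
instance (this_mask : String) (out : List String) : Decidable (Spec_mask_variants this_mask out) := by unfold Spec_mask_variants; infer_instance

-- ===== CLAIM (what is proved, stated in full; the proofs are below) =====
def Claim_equal_mask_variants : Prop := ∀ (this_mask : String), Dom_mask_variants this_mask → Spec_mask_variants this_mask (mask_variants this_mask)

-- ===== LEMMAS AND PROOFS =====
def pvStep (cs : List (List Char)) : List (List Char) :=
  cs.flatMap (fun bits => ['0', '1'].map (fun b => bits ++ [b]))

theorem pvFoldlConstIterate {α β : Type} (f : β → β) :
    ∀ (xs : List α) (a : β), xs.foldl (fun b _ => f b) a = f^[xs.length] a := by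
  intro xs
  induction xs with
  | nil => intro a; rfl
  | cons x xs ih =>
      intro a
      simp [List.foldl_cons, ih, Function.iterate_succ_apply]

theorem pvCombos_eq (idxs : List Int) : pvCombos idxs = pvStep^[idxs.length] [[]] :=
  pvFoldlConstIterate pvStep idxs [[]]

theorem pvStep_map_cons (c : Char) (Y : List (List Char)) :
    pvStep (Y.map (c :: ·)) = (pvStep Y).map (c :: ·) := by
  simp [pvStep, List.flatMap_map, List.map_flatMap]

theorem pvStep_append (Y Z : List (List Char)) : pvStep (Y ++ Z) = pvStep Y ++ pvStep Z := by
  simp [pvStep]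

-- the bit combinations decompose on the FIRST bit (leftmost X varies slowest)
theorem pvStep_iterate_succ (k : Nat) :
    pvStep^[k + 1] [[]] = (pvStep^[k] [[]]).map ('0' :: ·) ++ (pvStep^[k] [[]]).map ('1' :: ·) := by
  induction k with
  | zero => rfl
  | succ k ih =>
      rw [Function.iterate_succ_apply' pvStep (k + 1) [[]], ih, pvStep_append,
        pvStep_map_cons, pvStep_map_cons, ← ih, Function.iterate_succ_apply' pvStep k [[]]]

theorem pvFilterX_nil (l : List Char) (s : Int) (h : 'X' ∉ l) :
    ((PySem.List.enumerate l s).filter (fun p => p.2 == 'X')) = [] := by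
  rw [List.filter_eq_nil_iff]
  intro p hp
  obtain ⟨k, hk, hpk⟩ := (PySem.List.mem_enumerate_iff l s p).1 hp
  subst hpk
  have hne : l[k] ≠ 'X' := fun he => h (he ▸ List.getElem_mem hk)
  simpa using hne

theorem pvXIndices_nil (l : List Char) (h : 'X' ∉ l) : pvXIndices l = [] := by
  unfold pvXIndices
  rw [pvFilterX_nil l 0 h, List.map_nil]

theorem pvXIndices_decomp (l : List Char) (i : Nat) (c : Char) (hc : (c == 'X') = false)
    (h : PySem.List.index? l 'X' = some i) :
    pvXIndices l = (i : Int) :: pvXIndices (l.set i c) := by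
  rcases (PySem.List.index?_eq_some_iff l 'X' i).1 h with ⟨pre, suf, rfl, rfl, hpre⟩
  have hset : (pre ++ 'X' :: suf).set pre.length c = pre ++ c :: suf := by simp
  rw [hset]
  unfold pvXIndices
  rw [PySem.List.enumerate_append, PySem.List.enumerate_append,
    List.filter_append, List.filter_append, pvFilterX_nil pre 0 hpre]
  simp [PySem.List.enumerate_cons, hc]

theorem maskVarB_eq (l : List Char) :
    maskVarB l = (pvStep^[(pvXIndices l).length] [[]]).map
      (fun bits => ((pvXIndices l).zip bits).foldl (fun ch p => ch.set p.1.toNat p.2) l) := by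
  rw [maskVarB, pvCombos_eq]

theorem maskVar_eq_aux (n : Nat) : ∀ (l : List Char), l.count 'X' = n → maskVarA l = maskVarB l := by
  induction n using Nat.strong_induction_on with
  | _ n ih =>
    intro l hn
    rw [maskVarA]
    split
    · next h =>
        have hmem : 'X' ∉ l := fun hm =>
          (PySem.Chars.isIn_eq_false_iff ['X'] l).1 h ((List.singleton_infix_iff 'X' l).2 hm)
        rw [maskVarB_eq, pvXIndices_nil l hmem]
        rfl
    · next h =>
        split
        · next i hi =>
            have hin : i < l.length := pvIndexLt l i hi
            have ih0 : maskVarA (l.set i '0') = maskVarB (l.set i '0') :=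
              ih _ (hn ▸ pvCountSetLt l i '0' (by decide) hi) _ rfl
            have ih1 : maskVarA (l.set i '1') = maskVarB (l.set i '1') :=
              ih _ (hn ▸ pvCountSetLt l i '1' (by decide) hi) _ rfl
            rw [pvSliceSet l i '0' hin, pvSliceSet l i '1' hin, ih0, ih1]
            have hd0 := pvXIndices_decomp l i '0' (by decide) hi
            have hd1 := pvXIndices_decomp l i '1' (by decide) hi
            have hrest : pvXIndices (l.set i '1') = pvXIndices (l.set i '0') :=
              (List.cons_eq_cons.mp (hd0.symm.trans hd1)).2.symm
            rw [maskVarB_eq l, maskVarB_eq (l.set i '0'), maskVarB_eq (l.set i '1'), hrest, hd0,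
              List.length_cons, pvStep_iterate_succ, List.map_append, List.map_map, List.map_map]
            congr 1
        · next hi =>
            have hnm : 'X' ∉ l := (PySem.List.index?_eq_none_iff l 'X').1 hi
            exact absurd (by
              rw [PySem.Chars.isIn_eq_false_iff]
              exact fun hinf => hnm ((List.singleton_infix_iff 'X' l).1 hinf)) h

theorem maskVarA_eq_maskVarB (l : List Char) : maskVarA l = maskVarB l :=
  maskVar_eq_aux (l.count 'X') l rfl

-- ===== VERDICT (by name: the statement is the Claim_ definition above) =====
theorem mask_variants_spec : Claim_equal_mask_variants := by
  intro s _
  unfold Spec_mask_variants mask_variants mask_variants_alt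
  rw [maskVarA_eq_maskVarB]
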